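-- pv_equiv track=rewrite | github.com/emosy/ncr-hackgt6 | transaction_analysis.py | collect_data_dict
-- ===== SOURCE A (Python) =====
-- def collect_data_dict(data, filters):
--     out = []
--     for filter in filters:
--         out.append([])
--     for line in data:
--         # line_list = []
--         for index, filter in enumerate(filters):
--             out[index].append([line[filter]][0])
--             # line_list.append(line[filter])
--         # if isinstance(line[key], list):
--         #     out[line[key][0]] = line_list
--         # else:
--         #     out[line[key]] = line_list
--     for index in range(len(filters)):
--         out[index].reverse()
--     return out
-- ===== SOURCE B (Python) =====
-- def collect_data_dict(data, filters):
--     rows = list(data)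
--     return [[line[f] for line in reversed(rows)] for f in filters]
-- ===== Notes on version B (the rewrite author's own statement) =====
-- stated objective: simpler
-- what changed: Column-major construction: one comprehension per filter over the reversed rows replaces the row-major distribution pass with indexed appends plus a separate per-column reverse pass.
import Mathlib
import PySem

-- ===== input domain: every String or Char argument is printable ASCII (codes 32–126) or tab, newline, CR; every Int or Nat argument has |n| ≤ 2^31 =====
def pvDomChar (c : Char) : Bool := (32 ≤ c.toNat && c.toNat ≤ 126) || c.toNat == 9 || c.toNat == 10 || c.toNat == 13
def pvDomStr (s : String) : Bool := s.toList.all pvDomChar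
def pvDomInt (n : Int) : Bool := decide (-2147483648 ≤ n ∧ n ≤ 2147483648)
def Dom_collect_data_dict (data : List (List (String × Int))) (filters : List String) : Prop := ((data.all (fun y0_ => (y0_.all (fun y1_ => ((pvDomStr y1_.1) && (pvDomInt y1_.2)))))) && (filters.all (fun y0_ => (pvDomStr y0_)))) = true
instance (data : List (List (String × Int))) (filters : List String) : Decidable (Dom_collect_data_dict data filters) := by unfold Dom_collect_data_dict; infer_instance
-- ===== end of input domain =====

-- B builds the result column-major (one pass per filter over the reversed rows) instead of
-- A's row-major distribution with indexed appends followed by a per-column reverse pass; objective: simpler.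
-- line[filter] on the dict-as-association-list: first match; none = KeyError (excluded by Pre_).
def pyLookup? (line : List (String × Int)) (f : String) : Option Int :=
  (line.find? (fun p => p.1 == f)).map (·.2)

-- ===== PORT A =====
def collect_data_dict (data : List (List (String × Int))) (filters : List String) : List (List Int) :=
  -- out = []; for filter in filters: out.append([])
  let out : List (List Int) := filters.foldl (fun o _ => o ++ [[]]) []
  -- for line in data: for index, filter in enumerate(filters): out[index].append([line[filter]][0])
  let out := data.foldl (fun o line =>
    (PySem.List.enumerate filters).foldl (fun o p =>
      o.modify p.1.toNat (fun col => col ++ [[(pyLookup? line p.2).getD 0].headI])) o) out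
  -- for index in range(len(filters)): out[index].reverse()
  (PySem.List.pyRange 0 filters.length 1).foldl (fun o i => o.modify i.toNat (·.reverse)) out

-- ===== PORT B =====
def collect_data_dict_alt (data : List (List (String × Int))) (filters : List String) : List (List Int) :=
  let rows := data
  filters.map (fun f => rows.reverse.map (fun line => (pyLookup? line f).getD 0))

-- ===== PRECONDITION & SPEC =====
-- Pre_: every filter key is present in every line (else Python A raises KeyError).
def Pre_collect_data_dict (data : List (List (String × Int))) (filters : List String) : Prop :=
  ∀ line ∈ data, ∀ f ∈ filters, (pyLookup? line f).isSome
instance (data : List (List (String × Int))) (filters : List String) : Decidable (Pre_collect_data_dict data filters) := by unfold Pre_collect_data_dict; infer_instance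
def pvWitness_collect_data_dict : (List (List (String × Int))) × List String :=
  ([[("a", 1), ("b", 2)], [("b", 4), ("a", 3)]], ["a", "b"])
def Spec_collect_data_dict (data : List (List (String × Int))) (filters : List String) (out : List (List Int)) : Prop := out = collect_data_dict_alt data filters
instance (data : List (List (String × Int))) (filters : List String) (out : List (List Int)) : Decidable (Spec_collect_data_dict data filters out) := by unfold Spec_collect_data_dict; infer_instance

-- ===== CLAIM (what is proved, stated in full; the proofs are below) =====
def Claim_equal_collect_data_dict : Prop := ∀ (data : List (List (String × Int))) (filters : List String), Dom_collect_data_dict data filters → Pre_collect_data_dict data filters → Spec_collect_data_dict data filters (collect_data_dict data filters)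

-- ===== LEMMAS AND PROOFS =====

-- value looked up for one cell, shared shorthand for the lemmas
-- (both Pythons evaluate line[filter]; Pre_ guarantees the key is present)

theorem pv_modify_append {α : Type} (F : α → α) :
    ∀ (pre : List α) (c : α) (suf : List α),
      (pre ++ c :: suf).modify pre.length F = pre ++ F c :: suf := by
  intro pre
  induction pre with
  | nil => intro c suf; simp [List.modify]
  | cons x xs ih => intro c suf; simp only [List.cons_append, List.length_cons, List.modify_succ_cons, ih]

theorem pv_zipWith_ext {α β γ : Type} (f g : α → β → γ)
    (h : ∀ a b, f a b = g a b) :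
    ∀ (xs : List α) (ys : List β), List.zipWith f xs ys = List.zipWith g xs ys := by
  intro xs
  induction xs with
  | nil => intro ys; simp
  | cons x xs ih => intro ys; cases ys <;> simp [h, ih]

theorem pv_zipWith_zipWith_same {α β γ δ : Type} (F : γ → β → δ) (G : α → β → γ) :
    ∀ (xs : List α) (ys : List β),
      List.zipWith F (List.zipWith G xs ys) ys = List.zipWith (fun a b => F (G a b) b) xs ys := by
  intro xs
  induction xs with
  | nil => intro ys; simp
  | cons x xs ih => intro ys; cases ys <;> simp [ih]

theorem pv_zipWith_append_nil :
    ∀ (cols : List (List Int)) (fs : List String), cols.length = fs.length →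
      List.zipWith (fun (col : List Int) (_ : String) => col ++ ([] : List Int)) cols fs = cols := by
  intro cols
  induction cols with
  | nil => intro fs _; simp
  | cons c cs ih => intro fs h; cases fs <;> simp_all

theorem pv_zipWith_map_left {α β γ : Type} (F : γ → α → β) (h : α → γ) :
    ∀ (fs : List α), List.zipWith F (fs.map h) fs = fs.map (fun f => F (h f) f) := by
  intro fs
  induction fs with
  | nil => simp
  | cons f fs ih => simp [ih]

theorem pv_init (fs : List String) :
    ∀ (acc : List (List Int)), fs.foldl (fun o _ => o ++ [[]]) acc = acc ++ fs.map (fun _ => ([] : List Int)) := by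
  induction fs with
  | nil => intro acc; simp
  | cons f fs ih => intro acc; simp [ih]

theorem pv_inner (line : List (String × Int)) :
    ∀ (fs : List String) (pre suf : List (List Int)), suf.length = fs.length →
      (PySem.List.enumerate fs (pre.length : Int)).foldl
          (fun o p => o.modify p.1.toNat (fun col => col ++ [[(pyLookup? line p.2).getD 0].headI])) (pre ++ suf)
        = pre ++ List.zipWith (fun col f => col ++ [(pyLookup? line f).getD 0]) suf fs := by
  intro fs
  induction fs with
  | nil => intro pre suf h; simp at h; simp [PySem.List.enumerate_nil, h]
  | cons f fs ih =>
    intro pre suf h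
    cases suf with
    | nil => simp at h
    | cons c suf =>
      rw [PySem.List.enumerate_cons]
      simp only [List.foldl_cons, Int.toNat_natCast]
      rw [pv_modify_append]
      have hc : pre ++ (c ++ [[(pyLookup? line f).getD 0].headI]) :: suf
          = (pre ++ [c ++ [[(pyLookup? line f).getD 0].headI]]) ++ suf := by simp
      have hs : (pre.length : Int) + 1 = ((pre ++ [c ++ [[(pyLookup? line f).getD 0].headI]]).length : Int) := by
        simp
      rw [hc, hs, ih (pre ++ [c ++ [[(pyLookup? line f).getD 0].headI]]) suf (by simpa using h)]
      simp

theorem pv_outer (fs : List String) :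
    ∀ (data : List (List (String × Int))) (cols : List (List Int)), cols.length = fs.length →
      data.foldl (fun o line =>
          (PySem.List.enumerate fs).foldl
            (fun o p => o.modify p.1.toNat (fun col => col ++ [[(pyLookup? line p.2).getD 0].headI])) o) cols
        = List.zipWith (fun col f => col ++ data.map (fun line => (pyLookup? line f).getD 0)) cols fs := by
  intro data
  induction data with
  | nil =>
    intro cols h
    simp only [List.foldl_nil, List.map_nil]
    exact (pv_zipWith_append_nil cols fs h).symm
  | cons line data ih =>
    intro cols h
    simp only [List.foldl_cons]
    have h0 : (PySem.List.enumerate fs).foldl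
        (fun o p => o.modify p.1.toNat (fun col => col ++ [[(pyLookup? line p.2).getD 0].headI])) cols
        = List.zipWith (fun col f => col ++ [(pyLookup? line f).getD 0]) cols fs := by
      have := pv_inner line fs [] cols h
      simpa using this
    rw [h0, ih _ (by simp [h, List.length_zipWith]),
        pv_zipWith_zipWith_same
          (fun col f => col ++ data.map (fun line => (pyLookup? line f).getD 0))
          (fun col f => col ++ [(pyLookup? line f).getD 0]) cols fs]
    exact pv_zipWith_ext _ _ (fun c f => by simp) cols fs

theorem pv_revfold :
    ∀ (suf pre : List (List Int)),
      (PySem.List.pyRange (pre.length : Int) ((pre.length : Int) + suf.length) 1).foldl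
          (fun o i => o.modify i.toNat (·.reverse)) (pre ++ suf)
        = pre ++ suf.map (·.reverse) := by
  intro suf
  induction suf with
  | nil => intro pre; rw [PySem.List.pyRange_one]; simp
  | cons c suf ih =>
    intro pre
    rw [PySem.List.pyRange_one_cons (by push_cast [List.length_cons]; omega)]
    simp only [List.foldl_cons, Int.toNat_natCast]
    rw [pv_modify_append]
    have hc : pre ++ c.reverse :: suf = (pre ++ [c.reverse]) ++ suf := by simp
    have hs : (pre.length : Int) + 1 = ((pre ++ [c.reverse]).length : Int) := by simp
    have hb : (pre.length : Int) + ((c :: suf).length : Int)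
        = ((pre ++ [c.reverse]).length : Int) + (suf.length : Int) := by simp; omega
    rw [hc, hb, hs, ih (pre ++ [c.reverse])]
    simp

-- ===== VERDICT (by name: the statement is the Claim_ definition above) =====
theorem collect_data_dict_spec : Claim_equal_collect_data_dict := by
  intro data filters _ _
  unfold Spec_collect_data_dict collect_data_dict collect_data_dict_alt
  rw [pv_init filters []]
  simp only [List.nil_append]
  rw [pv_outer filters data (filters.map fun _ => ([] : List Int)) (by simp),
      pv_zipWith_map_left (fun col f => col ++ data.map (fun line => (pyLookup? line f).getD 0))
        (fun _ => ([] : List Int)) filters]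
  simp only [List.nil_append]
  have hlen : (filters.length : Int)
      = (((filters.map fun f => data.map (fun line => (pyLookup? line f).getD 0)).length : Nat) : Int) := by simp
  rw [hlen]
  have := pv_revfold (filters.map fun f => data.map (fun line => (pyLookup? line f).getD 0)) []
  simp only [List.length_nil, Nat.cast_zero, List.nil_append, zero_add] at this
  rw [this]
  simp [Function.comp, List.map_reverse]
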